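-- pv_equiv track=rewrite | github.com/monnieet/CaPillar_Git | capi/comptage.py | cht
-- ===== SOURCE A (Python) =====
-- def cht(f):
-- 	compteur = 0
-- 	signe = 1
-- 	graphe = len(f)*[0]
-- 	for i in range(len(f)):
-- 		if f[i] == 1 and signe == -1:
-- 			compteur += 1
-- 			signe = 1
-- 			graphe[i] = 1
-- 		if f[i] == -1 and signe == 1:
-- 			signe = -1
-- 	return compteur, graphe
-- ===== SOURCE B (Python) =====
-- def cht(f):
--     # Two-pass: materialize the significant (+/-1) entries with their positions,
--     # then scan consecutive pairs for a -1 -> 1 transition.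
--     sig = [(i, v) for i, v in enumerate(f) if v == 1 or v == -1]
--     compteur = 0
--     graphe = len(f) * [0]
--     for (pi, pv), (ci, cv) in zip(sig, sig[1:]):
--         if pv == -1 and cv == 1:
--             compteur += 1
--             graphe[ci] = 1
--     return compteur, graphe
-- ===== Notes on version B (the rewrite author's own statement) =====
-- stated objective: alternative
-- what changed: B first materializes the filtered list of significant (+/-1) entries with their indices and then folds over consecutive pairs (zip sig sig[1:]) marking -1->1 transitions, instead of A's single state machine carrying a running sign over all indices.
import Mathlib
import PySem

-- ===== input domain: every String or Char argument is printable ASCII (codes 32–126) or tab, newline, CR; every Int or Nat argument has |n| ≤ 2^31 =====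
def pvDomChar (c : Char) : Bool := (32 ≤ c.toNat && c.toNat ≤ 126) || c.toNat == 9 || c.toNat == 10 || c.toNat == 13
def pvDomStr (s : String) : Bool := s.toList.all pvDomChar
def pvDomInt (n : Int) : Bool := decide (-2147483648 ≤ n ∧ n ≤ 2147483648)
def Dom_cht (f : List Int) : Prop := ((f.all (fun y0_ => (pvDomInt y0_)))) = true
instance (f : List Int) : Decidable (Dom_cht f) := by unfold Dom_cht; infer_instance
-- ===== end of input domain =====

-- B replaces A's running-sign state machine by a filter of the ±1 entries followed by a
-- scan of consecutive pairs; same O(n) cost, different decomposition (objective: alternative).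

-- ===== PORT A =====
-- literal transliteration: for i in range(len(f)), f[i] via pyGetD (index always in range)
def cht (f : List Int) : Int × List Int :=
  let r := (PySem.List.pyRange 0 (PySem.List.len f) 1).foldl
    (fun (st : Int × Int × List Int) i =>
      let fi := PySem.List.pyGetD f i 0
      let st1 := if fi = 1 ∧ st.2.1 = -1 then (st.1 + 1, (1 : Int), st.2.2.set i.toNat 1) else st
      if fi = -1 ∧ st1.2.1 = 1 then (st1.1, (-1 : Int), st1.2.2) else st1)
    (0, 1, List.replicate f.length 0)
  (r.1, r.2.2)

-- ===== PORT B =====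
-- sig[1:] is ported as List.drop 1 (exact for the nonnegative literal slice start 1)
def cht_alt (f : List Int) : Int × List Int :=
  let sig := (PySem.List.enumerate f 0).filter (fun p => p.2 == 1 || p.2 == -1)
  (sig.zip (sig.drop 1)).foldl
    (fun (st : Int × List Int) pq =>
      if pq.1.2 = -1 ∧ pq.2.2 = 1 then (st.1 + 1, st.2.set pq.2.1.toNat 1) else st)
    (0, List.replicate f.length 0)

-- ===== PRECONDITION & SPEC =====
def Spec_cht (f : List Int) (out : Int × List Int) : Prop := out = cht_alt f
instance (f : List Int) (out : Int × List Int) : Decidable (Spec_cht f out) := by unfold Spec_cht; infer_instance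

-- ===== CLAIM (what is proved, stated in full; the proofs are below) =====
def Claim_equal_cht : Prop := ∀ (f : List Int), Dom_cht f → Spec_cht f (cht f)

-- ===== LEMMAS AND PROOFS =====

-- A's loop body, as a named step over an (index, value) pair
def chtStepA (st : Int × Int × List Int) (p : Int × Int) : Int × Int × List Int :=
  let st1 := if p.2 = 1 ∧ st.2.1 = -1 then (st.1 + 1, (1 : Int), st.2.2.set p.1.toNat 1) else st
  if p.2 = -1 ∧ st1.2.1 = 1 then (st1.1, (-1 : Int), st1.2.2) else st1

-- B's loop body
def chtStepB (st : Int × List Int) (pq : (Int × Int) × (Int × Int)) : Int × List Int :=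
  if pq.1.2 = -1 ∧ pq.2.2 = 1 then (st.1 + 1, st.2.set pq.2.1.toNat 1) else st

def chtSig (l : List (Int × Int)) : List (Int × Int) := l.filter (fun p => p.2 == 1 || p.2 == -1)

-- the head element of the chain only matters through whether its value is -1
theorem chtStepB_head_irrel (sig : List (Int × Int)) (x1 x2 : Int × Int)
    (h : (x1.2 = -1) ↔ (x2.2 = -1)) (st : Int × List Int) :
    ((x1 :: sig).zip sig).foldl chtStepB st = ((x2 :: sig).zip sig).foldl chtStepB st := by
  cases sig with
  | nil => rfl
  | cons hd t =>
    simp only [List.zip_cons_cons, List.foldl_cons]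
    have : chtStepB st (x1, hd) = chtStepB st (x2, hd) := by
      unfold chtStepB
      by_cases h2 : hd.2 = 1
      · by_cases h1 : x1.2 = -1
        · simp [h1, h2, h.mp h1]
        · have h1' : ¬ x2.2 = -1 := fun hx2 => h1 (h.mpr hx2)
          simp [h1, h1', h2]
      · simp [h2]
    rw [this]

theorem cht_key (l : List (Int × Int)) (c : Int) (s : Int) (g : List Int)
    (hs : s = 1 ∨ s = -1) :
    (let r := l.foldl chtStepA (c, s, g); (r.1, r.2.2)) =
    (((((0 : Int), s) :: chtSig l).zip (chtSig l)).foldl chtStepB (c, g)) := by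
  induction l generalizing c s g with
  | nil => cases hs <;> simp [chtSig]
  | cons p l ih =>
    obtain ⟨i, v⟩ := p
    by_cases hv1 : v = 1
    · subst hv1
      by_cases hsneg : s = -1
      · subst hsneg
        have hA : chtStepA (c, -1, g) (i, 1) = (c + 1, 1, g.set i.toNat 1) := by
          unfold chtStepA; norm_num
        have hsig : chtSig ((i, (1:Int)) :: l) = (i, 1) :: chtSig l := by
          simp [chtSig]
        simp only [List.foldl_cons, hA, hsig, List.zip_cons_cons]
        rw [ih (c + 1) 1 (g.set i.toNat 1) (Or.inl rfl)]
        have : chtStepB (c, g) (((0 : Int), (-1 : Int)), (i, 1)) = (c + 1, g.set i.toNat 1) := by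
          unfold chtStepB; norm_num
        rw [this]
        exact (chtStepB_head_irrel (chtSig l) (i, 1) (0, 1) (by norm_num) _).symm
      · have hA : chtStepA (c, s, g) (i, 1) = (c, s, g) := by
          unfold chtStepA
          rcases hs with h1 | h1
          · subst h1; norm_num
          · exact absurd h1 hsneg
        have hsig : chtSig ((i, (1:Int)) :: l) = (i, 1) :: chtSig l := by
          simp [chtSig]
        simp only [List.foldl_cons, hA, hsig, List.zip_cons_cons]
        rw [ih c s g hs]
        have : chtStepB (c, g) (((0 : Int), s), (i, 1)) = (c, g) := by
          unfold chtStepB; simp [hsneg]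
        rw [this]
        exact (chtStepB_head_irrel (chtSig l) (i, 1) (0, s) (by simp [hsneg]) _).symm
    · by_cases hvm : v = -1
      · subst hvm
        have hA : chtStepA (c, s, g) (i, -1) = (c, -1, g) := by
          unfold chtStepA
          rcases hs with h1 | h1 <;> subst h1 <;> norm_num
        have hsig : chtSig ((i, (-1:Int)) :: l) = (i, -1) :: chtSig l := by
          simp [chtSig]
        simp only [List.foldl_cons, hA, hsig, List.zip_cons_cons]
        rw [ih c (-1) g (Or.inr rfl)]
        have : chtStepB (c, g) (((0 : Int), s), (i, -1)) = (c, g) := by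
          unfold chtStepB; norm_num
        rw [this]
        exact (chtStepB_head_irrel (chtSig l) (i, -1) (0, -1) (by norm_num) _).symm
      · have hA : chtStepA (c, s, g) (i, v) = (c, s, g) := by
          unfold chtStepA; simp [hv1, hvm]
        have hsig : chtSig ((i, v) :: l) = chtSig l := by
          simp [chtSig, hv1, hvm]
        simp only [List.foldl_cons, hA, hsig]
        exact ih c s g hs

-- the virtual head (0, 1) is a no-op, so the chain equals zip sig (sig.drop 1)
theorem cht_chain_drop (sig : List (Int × Int)) (st : Int × List Int) :
    ((((0 : Int), (1 : Int)) :: sig).zip sig).foldl chtStepB st =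
    (sig.zip (sig.drop 1)).foldl chtStepB st := by
  cases sig with
  | nil => rfl
  | cons hd t =>
    simp only [List.zip_cons_cons, List.foldl_cons, List.drop_one, List.tail_cons]
    have : chtStepB st (((0 : Int), (1 : Int)), hd) = st := by unfold chtStepB; norm_num
    rw [this]

theorem cht_eq_fold (f : List Int) :
    cht f = (let r := (PySem.List.enumerate f 0).foldl chtStepA (0, 1, List.replicate f.length 0)
             (r.1, r.2.2)) := by
  simp only [cht]
  rw [PySem.List.enumerate_eq_map_pyRange (d := 0), List.foldl_map]
  rfl

theorem cht_alt_eq_fold (f : List Int) :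
    cht_alt f = ((chtSig (PySem.List.enumerate f 0)).zip
                  ((chtSig (PySem.List.enumerate f 0)).drop 1)).foldl chtStepB
                  (0, List.replicate f.length 0) := by
  rfl

-- ===== VERDICT (by name: the statement is the Claim_ definition above) =====
theorem cht_spec : Claim_equal_cht := by
  intro f _
  unfold Spec_cht
  rw [cht_eq_fold, cht_alt_eq_fold,
    cht_key (PySem.List.enumerate f 0) 0 1 (List.replicate f.length 0) (Or.inl rfl),
    cht_chain_drop]
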